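-- pv_equiv track=rewrite | github.com/qinghuai999/python-learning-lab | src/learning/week5/FindDictionaryIndex.py | char_index
-- ===== SOURCE A (Python) =====
-- def char_index(xs: str) -> dict[str, list[int]]:
--     """
--     There is a string parameter, given a special letter,
--     find the index of the letter. If there are several similar letters,
--     list all indexes.
--     Args:
--         xs (str): A string words
--
--     Returns:
--         dict[str, list[int]]: Displaying the letter and index
--     """
--
--     indexs = {}
--     for i, char in enumerate(xs):
--         if char in indexs:
--             indexs[char].append(i)
--         else:
--             indexs[char] = [i]
--     return indexs
-- ===== SOURCE B (Python) =====
-- def char_index(xs: str) -> dict[str, list[int]]: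
--     # Different decomposition: first compute the distinct characters (first-occurrence
--     # order, like the original dict's key order), then for each one rescan the whole
--     # string collecting every index where it occurs.
--     return {c: [i for i, x in enumerate(xs) if x == c] for c in dict.fromkeys(xs)}
-- ===== Notes on version B (the rewrite author's own statement) =====
-- stated objective: alternative
-- what changed: Replaces the single incremental pass that grows per-key lists in a dict with an outer loop over the distinct characters and an inner full rescan of the string per character.
import Mathlib
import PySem

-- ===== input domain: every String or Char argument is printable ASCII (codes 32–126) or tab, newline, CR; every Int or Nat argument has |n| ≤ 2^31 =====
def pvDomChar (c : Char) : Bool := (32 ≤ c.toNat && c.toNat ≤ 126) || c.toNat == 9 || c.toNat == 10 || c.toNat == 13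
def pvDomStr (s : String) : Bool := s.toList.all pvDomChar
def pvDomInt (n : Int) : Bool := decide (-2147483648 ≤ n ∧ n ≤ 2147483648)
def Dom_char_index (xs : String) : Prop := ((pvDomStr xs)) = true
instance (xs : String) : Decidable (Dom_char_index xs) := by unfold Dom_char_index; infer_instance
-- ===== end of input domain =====

-- B replaces A's single incremental dict-building pass by an outer loop over the
-- distinct characters with a full rescan of the string per character (alternative
-- decomposition, same results).


-- ===== PORT A =====
-- One pass over enumerate(xs): append the index if the char is already a key,
-- else insert a fresh singleton list.  Keys are Chars internally (Python's 1-char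
-- strings); the final map renders them as Strings per the type convention.
def char_index (xs : String) : List (String × List Int) :=
  let d := (PySem.List.enumerate xs.toList).foldl
    (fun d (p : Int × Char) =>
      if d.contains p.2 then d.modify p.2 [] (· ++ [p.1]) else d.insert p.2 [p.1])
    PySem.Dict.empty
  d.items.map (fun p => (String.ofList [p.1], p.2))

-- ===== PORT B =====
-- dict.fromkeys(xs) = PySem.List.dedup; per distinct char, rescan enumerate(xs).
def char_index_alt (xs : String) : List (String × List Int) :=
  (PySem.List.dedup xs.toList).map (fun c =>
    (String.ofList [c],
      ((PySem.List.enumerate xs.toList).filter (fun p => p.2 == c)).map (·.1)))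

-- ===== PRECONDITION & SPEC =====
def Spec_char_index (xs : String) (out : List (String × List Int)) : Prop := out = char_index_alt xs
instance (xs : String) (out : List (String × List Int)) : Decidable (Spec_char_index xs out) := by unfold Spec_char_index; infer_instance

-- ===== CLAIM (what is proved, stated in full; the proofs are below) =====
def Claim_equal_char_index : Prop := ∀ (xs : String), Dom_char_index xs → Spec_char_index xs (char_index xs)

-- ===== LEMMAS AND PROOFS =====

-- A's branching step is exactly Dict.modify with default [].
theorem step_eq_modify (d : PySem.Dict Char (List Int)) (p : Int × Char) :
    (if d.contains p.2 then d.modify p.2 [] (· ++ [p.1]) else d.insert p.2 [p.1])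
      = d.modify p.2 [] (· ++ [p.1]) := by
  by_cases h : d.contains p.2 = true
  · simp [h]
  · simp only [Bool.not_eq_true] at h
    have h0 : d.getD p.2 [] = [] := PySem.Dict.getD_of_not_contains d [] h
    simp [h, PySem.Dict.insert, PySem.Dict.modify, PySem.Dict.contains, h0] at *

-- A dict with nodup keys matching l's first components and matching getD values
-- has exactly l as items.
theorem items_eq_of_keys_getD (d : PySem.Dict Char (List Int)) (l : List (Char × List Int))
    (hk : d.keys = l.map (·.1)) (hnd : d.keys.Nodup)
    (hv : ∀ p ∈ l, d.getD p.1 [] = p.2) : d.items = l := by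
  have hk' : d.items.map (·.1) = l.map (·.1) := by simpa [PySem.Dict.keys] using hk
  have hlen : d.items.length = l.length := by
    have := congrArg List.length hk'
    simpa using this
  apply List.ext_getElem hlen
  intro j h1 h2
  have h3 := congrArg (fun t => t[j]?) hk'
  simp only [List.getElem?_map, List.getElem?_eq_getElem h1, List.getElem?_eq_getElem h2,
    Option.map_some] at h3
  have hfst : (d.items[j]).1 = (l[j]).1 := by simpa using h3
  have hmem : (d.items[j].1, d.items[j].2) ∈ d.items := by
    simpa using List.getElem_mem h1
  have hv1 : d.getD d.items[j].1 [] = d.items[j].2 :=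
    PySem.Dict.getD_of_mem_items d hmem hnd []
  have hv2 : d.getD (l[j]).1 [] = (l[j]).2 := hv _ (List.getElem_mem h2)
  have hsnd : (d.items[j]).2 = (l[j]).2 := by rw [← hv1, hfst, hv2]
  exact Prod.ext hfst hsnd

-- ===== VERDICT (by name: the statement is the Claim_ definition above) =====
theorem char_index_spec : Claim_equal_char_index := by
  intro xs _
  unfold Spec_char_index
  simp only [char_index, char_index_alt]
  have hfun : (fun (d : PySem.Dict Char (List Int)) (p : Int × Char) =>
      if d.contains p.2 then d.modify p.2 [] (· ++ [p.1]) else d.insert p.2 [p.1])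
      = (fun d p => d.modify p.2 [] (· ++ [p.1])) :=
    funext fun d => funext fun p => step_eq_modify d p
  rw [hfun]
  set l := PySem.List.enumerate xs.toList (0 : Int) with hl
  have hswap : l.foldl (fun d p => d.modify p.2 [] (· ++ [p.1])) PySem.Dict.empty
      = (l.map Prod.swap).foldl (fun d q => d.modify q.1 [] (· ++ [q.2])) PySem.Dict.empty := by
    rw [List.foldl_map]
    simp
  rw [hswap]
  have hitems : ((l.map Prod.swap).foldl (fun d q => d.modify q.1 [] (· ++ [q.2]))
      PySem.Dict.empty).items = (PySem.List.dedup xs.toList).map (fun c =>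
      (c, (l.filter (fun p => p.2 == c)).map (·.1))) := by
    apply items_eq_of_keys_getD
    · rw [PySem.Dict.keys_foldl_modify_key]
      simp only [List.map_map, Function.comp_def, PySem.List.dedup_eq_ofList,
        Prod.fst_swap, PySem.Dict.keys_empty, PySem.Set.update_nil_left, List.map_id',
        PySem.List.map_snd_enumerate, hl]
    · exact PySem.Dict.nodup_keys_foldl_modify_key _ _ _ _ _ PySem.Dict.nodup_keys_empty
    · intro p hp
      simp only [List.mem_map] at hp
      obtain ⟨c, _, rfl⟩ := hp
      rw [PySem.Dict.getD_foldl_modify_append]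
      simp [List.filter_map, List.map_map, Function.comp_def]
  rw [hitems, List.map_map]
  simp [Function.comp_def]
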